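-- pv_equiv track=rewrite | github.com/takecian/ProgrammingStudyLog | AtCoder/abc111/c.py | count_and_sort
-- ===== SOURCE A (Python) =====
-- def count_and_sort(l):
--     dict = {}
--     for f in l:
--         if f not in dict:
--             dict[f] = 1
--         else:
--             dict[f] += 1
--     return sorted(dict.items(), key=lambda x: -x[1])
-- ===== SOURCE B (Python) =====
-- def count_and_sort(l):
--     d = {}
--     for f in l:
--         d[f] = d.get(f, 0) + 1
--     m = max(d.values(), default=0)
--     buckets = {}
--     for k, c in d.items():
--         buckets.setdefault(c, []).append(k)
--     out = []
--     for c in range(m, 0, -1):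
--         for k in buckets.get(c, []):
--             out.append((k, c))
--     return out
-- ===== Notes on version B (the rewrite author's own statement) =====
-- stated objective: alternative
-- what changed: The comparison sort (sorted with key -count) is replaced by a counting/bucket pass: keys are grouped into per-count buckets in dict order and emitted for counts m down to 1, which reproduces the stable descending-count order without comparing.
import Mathlib
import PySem

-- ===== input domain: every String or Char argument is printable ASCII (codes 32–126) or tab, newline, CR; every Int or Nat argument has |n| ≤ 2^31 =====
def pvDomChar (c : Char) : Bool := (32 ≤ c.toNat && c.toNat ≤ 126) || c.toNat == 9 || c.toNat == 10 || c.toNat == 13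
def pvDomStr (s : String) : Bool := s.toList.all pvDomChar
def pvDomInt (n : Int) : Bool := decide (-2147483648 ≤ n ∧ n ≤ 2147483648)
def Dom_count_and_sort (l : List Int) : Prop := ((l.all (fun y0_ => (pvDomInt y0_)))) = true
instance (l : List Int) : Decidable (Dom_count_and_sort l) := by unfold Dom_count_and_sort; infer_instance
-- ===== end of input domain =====

-- B replaces the comparison sort by a counting/bucket pass over the frequency dict (same return value).

-- ===== PORT A =====
def count_and_sort (l : List Int) : List (Int × Int) :=
  let d := l.foldl
    (fun d f => if d.contains f = false then d.insert f 1 else d.modify f 0 (fun v => v + 1))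
    PySem.Dict.empty
  PySem.List.sorted d.items (fun x => -x.2)

-- ===== PORT B =====
def count_and_sort_alt (l : List Int) : List (Int × Int) :=
  let d := l.foldl (fun d f => d.insert f (d.getD f 0 + 1)) PySem.Dict.empty
  let m := PySem.List.maxD d.values (fun c => c) 0
  let buckets := d.items.foldl
    (fun b p => b.insert p.2 (b.getD p.2 [] ++ [p.1])) PySem.Dict.empty
  (PySem.List.pyRange m 0 (-1)).foldl
    (fun out c => out ++ (buckets.getD c []).map (fun k => (k, c))) []

-- ===== PRECONDITION & SPEC =====
def Spec_count_and_sort (l : List Int) (out : List (Int × Int)) : Prop := out = count_and_sort_alt l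
instance (l : List Int) (out : List (Int × Int)) : Decidable (Spec_count_and_sort l out) := by unfold Spec_count_and_sort; infer_instance

-- ===== CLAIM (what is proved, stated in full; the proofs are below) =====
def Claim_equal_count_and_sort : Prop := ∀ (l : List Int), Dom_count_and_sort l → Spec_count_and_sort l (count_and_sort l)

-- ===== LEMMAS AND PROOFS =====

-- Both counting loops build the same dict: Python Counter-style fold.
lemma countfold_eq_counter (l : List Int) :
    l.foldl (fun d f => d.insert f (d.getD f 0 + 1)) PySem.Dict.empty = PySem.Dict.counter l := by
  rfl

lemma countfoldA_eq_counter (l : List Int) :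
    l.foldl
      (fun (d : PySem.Dict Int Int) f =>
        if d.contains f = false then d.insert f 1 else d.modify f 0 (fun v => v + 1))
      PySem.Dict.empty = PySem.Dict.counter l := by
  unfold PySem.Dict.counter
  apply PySem.List.foldl_congr_mem
  intro d f _
  by_cases h : d.contains f = true
  · simp [h, PySem.Dict.modify]
  · have h' : d.contains f = false := by simpa using h
    simp [h', PySem.Dict.modify, PySem.Dict.getD_of_not_contains d 0 h']

-- Placing an element after everything not-before it and before everything before it.
lemma insertBy_middle {α : Type} (before : α → α → Bool) (x : α) (L R : List α)
    (hL : ∀ y ∈ L, before x y = false) (hR : ∀ y ∈ R, before x y = true) :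
    PySem.List.insertBy before x (L ++ R) = L ++ x :: R := by
  induction L with
  | nil =>
    cases R with
    | nil => rfl
    | cons r rs => simp [PySem.List.insertBy, hR r (by simp)]
  | cons a L ih =>
    have ha := hL a (by simp)
    simp only [List.cons_append, PySem.List.insertBy, ha]
    simp only [Bool.false_eq_true, if_false]
    rw [ih (fun y hy => hL y (by simp [hy]))]

-- Python's STABLE sort by an Int key is the concatenation, over any strictly increasing
-- list vs covering all keys, of the key-v elements in original order.
lemma sorted_eq_flatMap_filter {α : Type} (key : α → Int) (vs : List Int)
    (hvs : vs.Pairwise (· < ·)) :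
    ∀ xs : List α, (∀ x ∈ xs, key x ∈ vs) →
      PySem.List.sorted xs key false = vs.flatMap (fun v => xs.filter (fun x => key x == v)) := by
  intro xs
  induction xs using List.reverseRecOn with
  | nil => intro _; simp [PySem.List.sorted]
  | append_singleton xs x ih =>
    intro hmem
    have hxs : ∀ y ∈ xs, key y ∈ vs := fun y hy => hmem y (by simp [hy])
    have hk : key x ∈ vs := hmem x (by simp)
    obtain ⟨vs₁, vs₂, hv⟩ := List.append_of_mem hk
    subst hv
    rw [List.pairwise_append] at hvs
    obtain ⟨hp1, hp2, hcross⟩ := hvs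
    rw [List.pairwise_cons] at hp2
    obtain ⟨hk2, hp2⟩ := hp2
    have hstep : PySem.List.sorted (xs ++ [x]) key false
        = PySem.List.insertBy (fun a b => decide (key a < key b)) x (PySem.List.sorted xs key false) := by
      rw [PySem.List.sorted_eq_foldl_insertBy, PySem.List.sorted_eq_foldl_insertBy, List.foldl_append]
      rfl
    rw [hstep, ih hxs]
    rw [List.flatMap_append, List.flatMap_cons, ← List.append_assoc]
    rw [insertBy_middle _ x _ _ ?hL ?hR]
    case hL =>
      intro y hy
      rcases List.mem_append.mp hy with hy1 | hy2
      · obtain ⟨v, hv1, hyf⟩ := List.mem_flatMap.mp hy1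
        have : key y = v := by simpa using (List.mem_filter.mp hyf).2
        have hlt : v < key x := hcross v hv1 (key x) (by simp)
        simp [this]; omega
      · have : key y = key x := by simpa using (List.mem_filter.mp hy2).2
        simp [this]
    case hR =>
      intro y hy
      obtain ⟨v, hv2, hyf⟩ := List.mem_flatMap.mp hy
      have : key y = v := by simpa using (List.mem_filter.mp hyf).2
      have hlt : key x < v := hk2 v hv2
      simp [this]; omega
    rw [List.flatMap_append, List.flatMap_cons]
    have h1 : vs₁.flatMap (fun v => (xs ++ [x]).filter (fun a => key a == v))
        = vs₁.flatMap (fun v => xs.filter (fun a => key a == v)) := by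
      apply List.flatMap_congr
      intro v hv1
      rw [List.filter_append]
      have : key x ≠ v := by have := hcross v hv1 (key x) (by simp); omega
      simp [this]
    have h2 : vs₂.flatMap (fun v => (xs ++ [x]).filter (fun a => key a == v))
        = vs₂.flatMap (fun v => xs.filter (fun a => key a == v)) := by
      apply List.flatMap_congr
      intro v hv2
      rw [List.filter_append]
      have : key x ≠ v := by have := hk2 v hv2; omega
      simp [this]
    have h3 : (xs ++ [x]).filter (fun a => key a == key x)
        = xs.filter (fun a => key a == key x) ++ [x] := by
      rw [List.filter_append]; simp
    rw [h1, h2, h3]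
    simp [List.append_assoc]

-- The bucket dict's entry at c is exactly the keys whose count is c, in items order.
lemma buckets_getD (its : List (Int × Int)) :
    ∀ c : Int,
      ((its.foldl (fun b p => b.insert p.2 (b.getD p.2 [] ++ [p.1])) PySem.Dict.empty).getD c [])
        = (its.filter (fun p => p.2 == c)).map Prod.fst := by
  induction its using List.reverseRecOn with
  | nil => intro c; simp [PySem.Dict.getD_empty]
  | append_singleton its p ih =>
    intro c
    rw [List.foldl_append]
    simp only [List.foldl_cons, List.foldl_nil, List.filter_append, List.map_append]
    by_cases hc : c = p.2
    · subst hc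
      rw [PySem.Dict.getD_insert_self, ih p.2]
      simp
    · rw [PySem.Dict.getD_insert_of_ne _ _ _ (by omega), ih c]
      have : (p.2 == c) = false := by simp; omega
      simp [this]

-- Every count in the counter dict lies in [1, m] where m is the max value (dict nonempty).
lemma counter_count_bounds (l : List Int) (p : Int × Int)
    (hp : p ∈ (PySem.Dict.counter l).items) :
    0 < p.2 ∧ p.2 ≤ PySem.List.maxD (PySem.Dict.counter l).values (fun c => c) 0 := by
  constructor
  · rw [PySem.Dict.items_counter] at hp
    obtain ⟨k, hk, rfl⟩ := List.mem_map.mp hp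
    have hkl : k ∈ l := (PySem.Set.mem_ofList l k).mp hk
    have : 0 < l.count k := List.count_pos_iff.mpr hkl
    simpa using this
  · have hv : p.2 ∈ (PySem.Dict.counter l).values := by
      unfold PySem.Dict.values
      exact List.mem_map.mpr ⟨p, hp, rfl⟩
    rcases h : PySem.List.max? (PySem.Dict.counter l).values (fun c => c) with _ | m0
    · rw [PySem.List.max?_eq_none_iff] at h
      rw [h] at hv; simp at hv
    · have := PySem.List.max?_isMax h p.2 hv
      simp [PySem.List.maxD, h]
      exact this

lemma pyRange_neg_one_pairwise (m : Int) :
    ((PySem.List.pyRange m 0 (-1)).map (fun c => -c)).Pairwise (· < ·) := by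
  rw [List.pairwise_map, PySem.List.pyRange_neg_one_eq_reverse, List.pairwise_reverse]
  have := PySem.List.pairwise_lt_pyRange_one (0 + 1) (m + 1)
  exact this.imp (by intro a b h; omega)

-- ===== VERDICT (by name: the statement is the Claim_ definition above) =====
theorem count_and_sort_spec : Claim_equal_count_and_sort := by
  intro l _
  unfold Spec_count_and_sort count_and_sort count_and_sort_alt
  simp only [countfold_eq_counter, countfoldA_eq_counter]
  rw [PySem.List.foldl_append_eq_flatMap, List.nil_append]
  set its := (PySem.Dict.counter l).items with hits
  set m := PySem.List.maxD (PySem.Dict.counter l).values (fun c => c) 0 with hm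
  -- A's side: stable sort as flatMap of filters over the strictly increasing key list
  rw [sorted_eq_flatMap_filter (fun x => -x.2) ((PySem.List.pyRange m 0 (-1)).map (fun c => -c))
      (pyRange_neg_one_pairwise m) its
      (by
        intro x hx
        have hb := counter_count_bounds l x hx
        exact List.mem_map.mpr ⟨x.2, PySem.List.mem_pyRange_neg_one.mpr ⟨hb.1, hb.2⟩, rfl⟩)]
  rw [List.flatMap_map]
  apply List.flatMap_congr
  intro c _
  rw [buckets_getD its c]
  have hfe : (fun x : Int × Int => (-x.2 == -c)) = (fun x : Int × Int => (x.2 == c)) := by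
    funext x; by_cases h : x.2 = c <;> simp [h]
  rw [hfe, List.map_map]
  symm
  refine (List.map_congr_left (f := (fun k => (k, c)) ∘ Prod.fst) (g := id) ?_).trans (List.map_id _)
  intro p hp
  have h2 : p.2 = c := by simpa using (List.mem_filter.mp hp).2
  cases p
  simp_all
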